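-- pv_equiv track=rewrite | github.com/DamourYouKnow/HAHA-NO-UR | core/image_generator.py | compute_row
-- ===== SOURCE A (Python) =====
-- from typing import List, Sequence, Tuple
--
-- def compute_row(
--         row_sizes: List[Tuple[int]],
--         x_padding: int, y_pos: int) -> List[Tuple[int]]:
--     """
--     Compute the positions for a single row.
--
--     :param row_sizes: the list of image sizes in that row.
--     :param x_padding: the x padding in between images.
--     :param y_pos: the y position of that row.
--
--     :return: A list of (x, y) positions for that row.
--     """
--     res = []
--     x = 0
--     for size in row_sizes:
--         res.append((x, y_pos))
--         x += size[0] + x_padding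
--     return res
-- ===== SOURCE B (Python) =====
-- from typing import List, Sequence, Tuple
--
-- def compute_row(
--         row_sizes: List[Tuple[int]],
--         x_padding: int, y_pos: int) -> List[Tuple[int]]:
--     # First pass: build the table of running x-offsets (prefix sums of the
--     # deltas size[0] + x_padding, starting at 0).
--     offsets = [0]
--     for size in row_sizes:
--         offsets.append(offsets[-1] + size[0] + x_padding)
--     # Second pass: the position of image i is the offset BEFORE image i.
--     return [(x, y_pos) for x in offsets[:len(row_sizes)]]
-- ===== Notes on version B (the rewrite author's own statement) =====
-- stated objective: alternative
-- what changed: B first materialises the full table of cumulative x-offsets in one pass, then maps its first len(row_sizes) entries to (x, y_pos) pairs in a second pass, instead of A's single interleaved loop that emits a pair and bumps the accumulator together.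
import Mathlib
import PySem

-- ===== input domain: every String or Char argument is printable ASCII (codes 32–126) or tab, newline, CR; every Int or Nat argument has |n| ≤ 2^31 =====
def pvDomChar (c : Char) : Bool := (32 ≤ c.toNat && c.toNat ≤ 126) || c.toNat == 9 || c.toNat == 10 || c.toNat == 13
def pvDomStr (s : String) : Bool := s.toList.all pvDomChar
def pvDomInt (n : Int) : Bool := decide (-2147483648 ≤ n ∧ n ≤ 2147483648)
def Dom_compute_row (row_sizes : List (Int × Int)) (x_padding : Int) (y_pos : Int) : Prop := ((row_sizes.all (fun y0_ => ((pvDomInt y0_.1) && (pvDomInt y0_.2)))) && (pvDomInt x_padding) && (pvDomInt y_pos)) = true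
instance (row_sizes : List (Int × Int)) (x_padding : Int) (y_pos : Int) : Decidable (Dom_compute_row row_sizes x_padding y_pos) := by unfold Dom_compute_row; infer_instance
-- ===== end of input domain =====

-- B replaces A's interleaved accumulate-and-emit loop by a two-pass decomposition:
-- build the full prefix table of x-offsets first, then map it to (x, y_pos) pairs (alternative, same cost).

-- ===== PORT A =====
-- res = []; x = 0; for size in row_sizes: res.append((x, y_pos)); x += size[0] + x_padding
def compute_row (row_sizes : List (Int × Int)) (x_padding : Int) (y_pos : Int) : List (Int × Int) :=
  (row_sizes.foldl
    (fun (s : List (Int × Int) × Int) size => (s.1 ++ [(s.2, y_pos)], s.2 + size.1 + x_padding))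
    (([] : List (Int × Int)), (0 : Int))).1

-- ===== PORT B =====
-- offsets = [0]; for size: offsets.append(offsets[-1] + size[0] + x_padding);
-- return [(x, y_pos) for x in offsets[:len(row_sizes)]]
def compute_row_alt (row_sizes : List (Int × Int)) (x_padding : Int) (y_pos : Int) : List (Int × Int) :=
  let offsets := row_sizes.foldl
    (fun (xs : List Int) size => xs ++ [xs.getLastD 0 + size.1 + x_padding])
    ([0] : List Int)
  (offsets.take row_sizes.length).map (fun x => (x, y_pos))

-- ===== PRECONDITION & SPEC =====
def Spec_compute_row (row_sizes : List (Int × Int)) (x_padding : Int) (y_pos : Int) (out : List (Int × Int)) : Prop := out = compute_row_alt row_sizes x_padding y_pos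
instance (row_sizes : List (Int × Int)) (x_padding : Int) (y_pos : Int) (out : List (Int × Int)) : Decidable (Spec_compute_row row_sizes x_padding y_pos out) := by unfold Spec_compute_row; infer_instance

-- ===== CLAIM (what is proved, stated in full; the proofs are below) =====
def Claim_equal_compute_row : Prop := ∀ (row_sizes : List (Int × Int)) (x_padding : Int) (y_pos : Int), Dom_compute_row row_sizes x_padding y_pos → Spec_compute_row row_sizes x_padding y_pos (compute_row row_sizes x_padding y_pos)

-- ===== LEMMAS AND PROOFS =====

-- reference form: the row positions starting at offset x0
def specRow (p y : Int) : List (Int × Int) → Int → List (Int × Int)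
  | [], _ => []
  | s :: t, x0 => (x0, y) :: specRow p y t (x0 + s.1 + p)

-- the offsets produced after x0
def offsRow (p : Int) : List (Int × Int) → Int → List Int
  | [], _ => []
  | s :: t, x0 => (x0 + s.1 + p) :: offsRow p t (x0 + s.1 + p)

theorem foldA_eq (p y : Int) : ∀ (rs : List (Int × Int)) (res : List (Int × Int)) (x0 : Int),
    (rs.foldl (fun (s : List (Int × Int) × Int) size => (s.1 ++ [(s.2, y)], s.2 + size.1 + p)) (res, x0)).1
      = res ++ specRow p y rs x0 := by
  intro rs
  induction rs with
  | nil => intro res x0; simp [specRow]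
  | cons s t ih => intro res x0; simp [List.foldl, specRow, ih]

theorem foldB_eq (p : Int) : ∀ (rs : List (Int × Int)) (acc : List Int), acc ≠ [] →
    rs.foldl (fun (xs : List Int) size => xs ++ [xs.getLastD 0 + size.1 + p]) acc
      = acc ++ offsRow p rs (acc.getLastD 0) := by
  intro rs
  induction rs with
  | nil => intro acc _; simp [offsRow]
  | cons s t ih =>
      intro acc hne
      have h2 : acc ++ [acc.getLastD 0 + s.1 + p] ≠ [] := by simp
      simp only [List.foldl, offsRow, ih _ h2]
      have : (acc ++ [acc.getLastD 0 + s.1 + p]).getLastD 0 = acc.getLastD 0 + s.1 + p := by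
        simp
      rw [this]
      simp

theorem take_map_eq (p y : Int) : ∀ (rs : List (Int × Int)) (x0 : Int),
    ((x0 :: offsRow p rs x0).take rs.length).map (fun x => (x, y)) = specRow p y rs x0 := by
  intro rs
  induction rs with
  | nil => intro x0; simp [specRow]
  | cons s t ih =>
      intro x0
      simp only [offsRow, specRow, List.length_cons, List.take_succ_cons, List.map_cons]
      exact congrArg _ (ih (x0 + s.1 + p))

-- ===== VERDICT (by name: the statement is the Claim_ definition above) =====
theorem compute_row_spec : Claim_equal_compute_row := by
  intro rs p y _
  unfold Spec_compute_row compute_row compute_row_alt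
  rw [foldA_eq p y rs [] 0, foldB_eq p rs [0] (by simp)]
  simpa using (take_map_eq p y rs 0).symm
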